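-- pv_equiv track=rewrite | github.com/simssousa15/AdventOfCode | 2025/day6/main.py | parser2
-- ===== SOURCE A (Python) =====
-- def invert_dim(m):
--     return list(map(list, zip(*m)))
--
-- def parser2(input):
--     lines = input.splitlines()
--     ops = []
--     ops_idx = []
--     for i, c in enumerate(lines[-1]):
--         if c != " ":
--             ops.append(c)
--             ops_idx.append(i)
--
--     nums = []
--     for l in lines[:-1]:
--         l_nums = []
--         tmp = ""
--         for i, c in enumerate(l):
--             if i+1 in ops_idx:
--                 l_nums.append(tmp)
--                 tmp = ""
--             else:
--                 tmp += c
--         if tmp: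
--             l_nums.append(tmp)
--         nums.append(l_nums)
--
--     return (ops, invert_dim(nums))
-- ===== SOURCE B (Python) =====
-- def parser2(input):
--     lines = input.splitlines()
--     header = lines[-1]
--     ops = [c for c in header if c != " "]
--     cuts = [i - 1 for i, c in enumerate(header) if c != " "]
--     nums = []
--     for l in lines[:-1]:
--         segs = []
--         start = 0
--         for cut in cuts:
--             if 0 <= cut < len(l):
--                 segs.append(l[start:cut])
--                 start = cut + 1
--         if l[start:]:
--             segs.append(l[start:])
--         nums.append(segs)
--     cols = []
--     j = 0
--     while nums and all(j < len(r) for r in nums):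
--         cols.append([r[j] for r in nums])
--         j += 1
--     return (ops, cols)
-- ===== Notes on version B (the rewrite author's own statement) =====
-- stated objective: alternative
-- what changed: B extracts ops/cuts with comprehensions, carves each line by slicing at cut positions (ops_idx-1) instead of A's char-by-char tmp accumulation, and transposes with an explicit column-index while loop instead of zip(*m).
-- outside the precondition, e.g. on parser2(''): A raises IndexError, B raises IndexError
import Mathlib
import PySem

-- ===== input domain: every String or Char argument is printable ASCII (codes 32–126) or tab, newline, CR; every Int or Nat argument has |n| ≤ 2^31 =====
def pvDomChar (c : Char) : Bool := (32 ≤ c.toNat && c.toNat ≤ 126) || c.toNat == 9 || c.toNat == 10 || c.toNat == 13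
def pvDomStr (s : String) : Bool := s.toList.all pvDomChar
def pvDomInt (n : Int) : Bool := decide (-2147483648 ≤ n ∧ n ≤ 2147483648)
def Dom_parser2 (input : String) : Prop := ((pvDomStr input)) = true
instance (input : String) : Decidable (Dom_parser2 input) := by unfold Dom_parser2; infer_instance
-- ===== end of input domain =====

-- B extracts ops/cuts with comprehensions, slices each line at the cut positions ops_idx-1
-- instead of accumulating characters one by one, and transposes with an explicit
-- column-index loop instead of zip(*m); objective: alternative decomposition, same cost.

-- ===== PORT A =====
-- A's helper invert_dim(m) = list(map(list, zip(*m))) — zip truncates to the shortest row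
def pvInvertDimAux : Nat → List (List String) → List (List String)
  | 0, _ => []
  | n + 1, m =>
      if m.any List.isEmpty then []
      else (m.map (fun r => r.headI)) :: pvInvertDimAux n (m.map List.tail)

def pvInvertDim (m : List (List String)) : List (List String) :=
  if m = [] then [] else pvInvertDimAux m.headI.length m

-- A's ops / ops_idx extraction loop
def pvOpsLoop : List (Int × Char) → List String × List Int → List String × List Int
  | [], acc => acc
  | (i, c) :: rest, (ops, idx) =>
      if c ≠ ' ' then pvOpsLoop rest (ops ++ [String.ofList [c]], idx ++ [i])
      else pvOpsLoop rest (ops, idx)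

-- A's per-line loop: accumulate tmp char by char, flush when i+1 is an op index
def pvSegA (S : List Int) : List (Int × Char) → List (List Char) → List Char → List (List Char)
  | [], lnums, tmp => if tmp ≠ [] then lnums ++ [tmp] else lnums
  | (i, c) :: rest, lnums, tmp =>
      if (i + 1) ∈ S then pvSegA S rest (lnums ++ [tmp]) []
      else pvSegA S rest lnums (tmp ++ [c])

def parser2 (input : String) : List String × List (List String) :=
  let lines := PySem.Str.splitlines input
  let last := (PySem.List.pyGet? lines (-1)).getD ""
  let opsPair := pvOpsLoop (PySem.List.enumerate last.toList 0) ([], [])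
  let nums := (PySem.List.slice lines none (some (-1))).map
    (fun l => (pvSegA opsPair.2 (PySem.List.enumerate l.toList 0) [] []).map String.ofList)
  (opsPair.1, pvInvertDim nums)

-- ===== PORT B =====
-- B's per-line loop: slice l at each cut position, keeping track of the segment start
def pvSegB (l : List Char) : List Int → List (List Char) → Int → List (List Char)
  | [], lnums, start =>
      let lastSeg := PySem.List.slice l (some start) none
      if lastSeg ≠ [] then lnums ++ [lastSeg] else lnums
  | cut :: rest, lnums, start =>
      if 0 ≤ cut ∧ cut < (l.length : Int) then
        pvSegB l rest (lnums ++ [PySem.List.slice l (some start) (some cut)]) (cut + 1)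
      else pvSegB l rest lnums start

-- B's transpose: while nums and all(j < len(r) for r in nums): take column j
-- (fuel = length of the first row, enough since the loop stops at the shortest row)
def pvColsB (m : List (List String)) : Nat → Nat → List (List String)
  | 0, _ => []
  | fuel + 1, j =>
      if m ≠ [] ∧ m.all (fun r => j < r.length) then
        (m.map (fun r => r.getD j "")) :: pvColsB m fuel (j + 1)
      else []

def parser2_alt (input : String) : List String × List (List String) :=
  let lines := PySem.Str.splitlines input
  let header := (PySem.List.pyGet? lines (-1)).getD ""
  let ops := (header.toList.filter (fun c => c ≠ ' ')).map (fun c => String.ofList [c])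
  let cuts := ((PySem.List.enumerate header.toList 0).filter (fun p => p.2 ≠ ' ')).map
    (fun p => p.1 - 1)
  let nums := (PySem.List.slice lines none (some (-1))).map
    (fun l => (pvSegB l.toList cuts [] 0).map String.ofList)
  (ops, pvColsB nums nums.headI.length 0)

-- ===== PRECONDITION & SPEC =====
-- Pre_ excludes the empty input, on which Python's lines[-1] raises IndexError.
def Pre_parser2 (input : String) : Prop := input ≠ ""
instance (input : String) : Decidable (Pre_parser2 input) := by unfold Pre_parser2; infer_instance
def pvWitness_parser2 : String := "1 2\n+"

def Spec_parser2 (input : String) (out : List String × List (List String)) : Prop := out = parser2_alt input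
instance (input : String) (out : List String × List (List String)) : Decidable (Spec_parser2 input out) := by unfold Spec_parser2; infer_instance

-- ===== CLAIM (what is proved, stated in full; the proofs are below) =====
def Claim_equal_parser2 : Prop := ∀ (input : String), Dom_parser2 input → Pre_parser2 input → Spec_parser2 input (parser2 input)

-- ===== LEMMAS AND PROOFS =====

-- pvOpsLoop's output is the accumulators followed by the filtered non-space entries
theorem pvOpsLoop_eq (ps : List (Int × Char)) (ops : List String) (idx : List Int) :
    pvOpsLoop ps (ops, idx) =
      (ops ++ (ps.filter (fun p => p.2 ≠ ' ')).map (fun p => String.ofList [p.2]),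
       idx ++ (ps.filter (fun p => p.2 ≠ ' ')).map (·.1)) := by
  induction ps generalizing ops idx with
  | nil => simp [pvOpsLoop]
  | cons p rest ih =>
      obtain ⟨i, c⟩ := p
      by_cases h : c = ' ' <;> simp [pvOpsLoop, h, ih]

-- the ops list of single-character strings is the same computed from the characters alone
theorem pvOps_chars (cs : List Char) (s : Int) :
    ((PySem.List.enumerate cs s).filter (fun p => p.2 ≠ ' ')).map (fun p => String.ofList [p.2])
      = (cs.filter (fun c => c ≠ ' ')).map (fun c => String.ofList [c]) := by
  have h1 : ((PySem.List.enumerate cs s).filter (fun p => p.2 ≠ ' ')).map (fun p => String.ofList [p.2])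
      = (((PySem.List.enumerate cs s).filter (fun p => p.2 ≠ ' ')).map (·.2)).map
          (fun c => String.ofList [c]) := by
    rw [List.map_map]; rfl
  rw [h1]
  congr 1
  conv_rhs => rw [← PySem.List.map_snd_enumerate cs s]
  rw [List.filter_map]
  rfl

-- dropping a head of S that can never match on the given pairs
theorem pvSegA_drop_head (S : List Int) (s : Int) (ps : List (Int × Char))
    (h : ∀ p ∈ ps, p.1 + 1 ≠ s) (lnums : List (List Char)) (tmp : List Char) :
    pvSegA (s :: S) ps lnums tmp = pvSegA S ps lnums tmp := by
  induction ps generalizing lnums tmp with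
  | nil => rfl
  | cons p rest ih =>
      obtain ⟨i, c⟩ := p
      have hne : i + 1 ≠ s := h (i, c) (by simp)
      by_cases hm : (i + 1) ∈ S
      · simp [pvSegA, List.mem_cons, hne, hm, ih fun q hq => h q (by simp [hq])]
      · simp [pvSegA, List.mem_cons, hne, hm, ih fun q hq => h q (by simp [hq])]

-- a run with no matching position flushes the remaining characters at the end
theorem pvSegA_no_match (S : List Int) (ps : List (Int × Char))
    (h : ∀ p ∈ ps, p.1 + 1 ∉ S) (lnums : List (List Char)) (tmp : List Char) :
    pvSegA S ps lnums tmp =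
      if tmp ++ ps.map (·.2) ≠ [] then lnums ++ [tmp ++ ps.map (·.2)] else lnums := by
  induction ps generalizing lnums tmp with
  | nil => simp [pvSegA]
  | cons p rest ih =>
      obtain ⟨i, c⟩ := p
      have hm : (i + 1) ∉ S := h (i, c) (by simp)
      simp only [pvSegA, if_neg (by simpa using hm)]
      rw [ih (fun q hq => h q (by simp [hq]))]
      simp

-- a run of non-matching characters followed by a matching position flushes exactly that run
theorem pvSegA_run (S : List Int) (cs1 : List Char) (c : Char) (cs2 : List Char) (i : Int)
    (h : ∀ k : Nat, k < cs1.length → (i + k + 1) ∉ S) (hm : (i + cs1.length + 1) ∈ S)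
    (lnums : List (List Char)) (tmp : List Char) :
    pvSegA S (PySem.List.enumerate (cs1 ++ c :: cs2) i) lnums tmp =
      pvSegA S (PySem.List.enumerate cs2 (i + cs1.length + 1)) (lnums ++ [tmp ++ cs1]) [] := by
  induction cs1 generalizing i tmp lnums with
  | nil =>
      simp only [List.nil_append, PySem.List.enumerate_cons, List.length_nil]
      simp only [List.length_nil, Nat.cast_zero, add_zero] at hm
      simp [pvSegA, hm]
  | cons a cs1' ih =>
      have h0 : (i + 1) ∉ S := by simpa using h 0 (by simp)
      simp only [List.cons_append, PySem.List.enumerate_cons]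
      simp only [pvSegA, if_neg (by simpa using h0)]
      rw [ih (i + 1) (fun k hk => by
            have h1 := h (k + 1) (by simpa using hk)
            intro hmem
            apply h1
            have e : i + 1 + (k : Int) + 1 = i + ((k + 1 : Nat) : Int) + 1 := by push_cast; ring
            rwa [e] at hmem)
          (by
            have e : i + 1 + (cs1'.length : Int) + 1 = i + ((a :: cs1').length : Int) + 1 := by
              simp only [List.length_cons]; push_cast; ring
            rw [e]; exact hm)]
      have e2 : i + 1 + (cs1'.length : Int) + 1 = i + ((a :: cs1').length : Int) + 1 := by
        simp only [List.length_cons]; push_cast; ring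
      rw [e2]
      simp

-- all cuts at or past the end of the line are skipped by B's loop
theorem pvSegB_big (l : List Char) (C : List Int) (h : ∀ c ∈ C, (l.length : Int) ≤ c)
    (lnums : List (List Char)) (start : Int) :
    pvSegB l C lnums start = pvSegB l [] lnums start := by
  induction C with
  | nil => rfl
  | cons c rest ih =>
      have hc := h c (by simp)
      have hneg : ¬((0 : Int) ≤ c ∧ c < (l.length : Int)) := by omega
      simp only [pvSegB, if_neg hneg]
      exact ih fun q hq => h q (by simp [hq])

-- main lemma: B's slicing loop over the cuts S.map (·-1) equals A's character loop over
-- the suffix of the line starting at `start`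
theorem pvSeg_main (S : List Int) : ∀ (start : Nat) (l : List Char) (lnums : List (List Char)),
    List.Pairwise (· < ·) S → (∀ s ∈ S, s = 0 ∨ (start : Int) < s) → start ≤ l.length →
    pvSegB l (S.map (· - 1)) lnums (start : Int) =
      pvSegA S (PySem.List.enumerate (l.drop start) start) lnums [] := by
  induction S with
  | nil =>
      intro start l lnums _ _ hlen
      rw [pvSegA_no_match _ _ (by simp)]
      simp only [List.map_nil, pvSegB, PySem.List.slice_from_natCast,
        PySem.List.map_snd_enumerate, List.nil_append]
  | cons s S' ih =>
      intro start l lnums hpw hinv hlen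
      have hS'gt : ∀ x ∈ S', s < x := fun x hx => (List.pairwise_cons.mp hpw).1 x hx
      have hpw' : List.Pairwise (· < ·) S' := (List.pairwise_cons.mp hpw).2
      have hinv' : ∀ x ∈ S', x = 0 ∨ (start : Int) < x :=
        fun x hx => hinv x (List.mem_cons_of_mem _ hx)
      have hs := hinv s (by simp)
      by_cases hzero : s = 0
      · -- cut = -1: B skips it, A can never match s = 0 since i + 1 ≥ 1
        subst hzero
        have hneg : ¬((0 : Int) ≤ 0 - 1 ∧ 0 - 1 < (l.length : Int)) := by omega
        simp only [List.map_cons, pvSegB, if_neg hneg]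
        rw [ih start l lnums hpw' hinv' hlen]
        rw [pvSegA_drop_head S' 0 _ (fun p hp => by
              rw [PySem.List.mem_enumerate_iff] at hp
              obtain ⟨k, hk, hpk⟩ := hp
              subst hpk; simp; omega)]
      · have hspos : (start : Int) < s := by rcases hs with h | h; exact absurd h hzero; exact h
        by_cases hbig : (l.length : Int) < s
        · -- cut = s-1 ≥ len: B skips everything from here on; A never matches any cut
          rw [pvSegB_big l _ (fun c hc => by
                simp only [List.map_cons, List.mem_cons, List.mem_map] at hc
                rcases hc with rfl | ⟨x, hx, rfl⟩
                · omega
                · have := hS'gt x hx; omega)]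
          rw [pvSegA_no_match _ _ (fun p hp => by
                rw [PySem.List.mem_enumerate_iff] at hp
                obtain ⟨k, hk, hpk⟩ := hp
                subst hpk
                intro hmem
                simp only [List.mem_cons] at hmem
                simp only [List.length_drop] at hk
                rcases hmem with hh | hh
                · omega
                · have := hS'gt _ hh; omega)]
          simp only [pvSegB, PySem.List.slice_from_natCast,
            PySem.List.map_snd_enumerate, List.nil_append]
        · -- cut = s-1 ∈ [start, len): B slices [start, s-1), A runs to position s-1 and flushes
          have hsle : s ≤ (l.length : Int) := by omega
          have hcuts : (((s - 1).toNat : Nat) : Int) = s - 1 := by omega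
          have hcutlt : (s - 1).toNat < l.length := by omega
          have hstartle : start ≤ (s - 1).toNat := by omega
          have hdecomp : l.drop start =
              (l.drop start).take ((s - 1).toNat - start) ++ l[(s - 1).toNat] :: l.drop ((s - 1).toNat + 1) := by
            conv_lhs => rw [← List.take_append_drop ((s - 1).toNat - start) (l.drop start)]
            congr 1
            rw [List.drop_drop]
            have e : start + ((s - 1).toNat - start) = (s - 1).toNat := by omega
            rw [e, List.drop_eq_getElem_cons hcutlt]
          have hrunlen : ((l.drop start).take ((s - 1).toNat - start)).length = (s - 1).toNat - start := by
            simp only [List.length_take, List.length_drop]; omega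
          have hpos : (0 : Int) ≤ s - 1 ∧ s - 1 < (l.length : Int) := ⟨by omega, by omega⟩
          simp only [List.map_cons, pvSegB, if_pos hpos]
          rw [hdecomp, pvSegA_run (s :: S') ((l.drop start).take ((s - 1).toNat - start))
              (l[(s - 1).toNat]) (l.drop ((s - 1).toNat + 1)) (start : Int)
              (fun k hk => by
                rw [hrunlen] at hk
                intro hmem
                simp only [List.mem_cons] at hmem
                rcases hmem with hh | hh
                · omega
                · have := hS'gt _ hh; omega)
              (by
                rw [hrunlen]
                simp only [List.mem_cons]
                left; omega)]
          have e2 : (start : Int) + (((l.drop start).take ((s - 1).toNat - start)).length : Int) + 1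
              = (((s - 1).toNat + 1 : Nat) : Int) := by
            rw [hrunlen]; push_cast; omega
          rw [e2]
          rw [pvSegA_drop_head S' s _ (fun p hp => by
                rw [PySem.List.mem_enumerate_iff] at hp
                obtain ⟨k, hk, hpk⟩ := hp
                subst hpk; simp; omega)]
          have hslice : PySem.List.slice l (some (start : Int)) (some (s - 1))
              = (l.drop start).take ((s - 1).toNat - start) := by
            rw [PySem.List.slice_toNat l (by omega) (by omega)]
            simp
          rw [hslice]
          have e1 : s - 1 + 1 = (((s - 1).toNat + 1 : Nat) : Int) := by push_cast; omega
          rw [e1]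
          have := ih ((s - 1).toNat + 1) l
            (lnums ++ [[] ++ (l.drop start).take ((s - 1).toNat - start)]) hpw'
            (fun x hx => by have := hS'gt x hx; right; push_cast; omega) (by omega)
          simpa using this

-- S = ops_idx is strictly increasing and nonnegative
theorem pvOpsIdx_inv (cs : List Char) :
    List.Pairwise (· < ·) (((PySem.List.enumerate cs 0).filter (fun p => p.2 ≠ ' ')).map (·.1)) ∧
    ∀ s ∈ ((PySem.List.enumerate cs 0).filter (fun p => p.2 ≠ ' ')).map (·.1), 0 ≤ s := by
  constructor
  · exact List.Pairwise.map _ (fun a b h => h)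
      ((PySem.List.pairwise_lt_enumerate cs 0).sublist List.filter_sublist)
  · intro s hs
    simp only [List.mem_map] at hs
    obtain ⟨p, hp, rfl⟩ := hs
    have hmem := List.mem_of_mem_filter hp
    rw [PySem.List.mem_enumerate_iff] at hmem
    obtain ⟨k, hk, rfl⟩ := hmem
    simp

-- top-level per-line equality for the actual ops_idx produced by pvOpsLoop
theorem pvSeg_top (cs l : List Char) :
    pvSegB l (((PySem.List.enumerate cs 0).filter (fun p => p.2 ≠ ' ')).map (fun p => p.1 - 1)) [] 0
      = pvSegA (pvOpsLoop (PySem.List.enumerate cs 0) ([], [])).2 (PySem.List.enumerate l 0) [] [] := by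
  have hSchar : (pvOpsLoop (PySem.List.enumerate cs 0) ([], [])).2
      = ((PySem.List.enumerate cs 0).filter (fun p => p.2 ≠ ' ')).map (·.1) := by
    rw [pvOpsLoop_eq]; simp
  obtain ⟨hpw, hnn⟩ := pvOpsIdx_inv cs
  rw [hSchar]
  have hcuts : (((PySem.List.enumerate cs 0).filter (fun p => p.2 ≠ ' ')).map (fun p => p.1 - 1))
      = ((((PySem.List.enumerate cs 0).filter (fun p => p.2 ≠ ' ')).map (·.1)).map (· - 1)) := by
    rw [List.map_map]; rfl
  rw [hcuts]
  have := pvSeg_main (((PySem.List.enumerate cs 0).filter (fun p => p.2 ≠ ' ')).map (·.1)) 0 l []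
    hpw (fun s hs => by have := hnn s hs; omega) (Nat.zero_le _)
  simpa using this

-- A's zip-based transpose equals B's column-index loop (m shifted by dropping j columns)
theorem pvCols_main (m : List (List String)) (hm : m ≠ []) :
    ∀ (n : Nat) (j : Nat), pvInvertDimAux n (m.map (List.drop j)) = pvColsB m n j := by
  intro n
  induction n with
  | zero => intro j; rfl
  | succ n ih =>
      intro j
      by_cases hall : m.all (fun r => decide (j < r.length))
      · have hnoemp : ¬ (m.map (List.drop j)).any List.isEmpty := by
          simp only [List.any_map, List.any_eq_true, Function.comp] at *
          simp only [List.all_eq_true] at hall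
          rintro ⟨r, hr, he⟩
          have := hall r hr
          simp only [List.isEmpty_iff, List.drop_eq_nil_iff] at he
          simp only [decide_eq_true_eq] at this
          omega
        simp only [pvInvertDimAux, pvColsB]
        rw [if_neg hnoemp, if_pos (show m ≠ [] ∧ (m.all fun r => decide (j < r.length)) = true from ⟨hm, hall⟩)]
        congr 1
        · simp only [List.map_map]
          apply List.map_congr_left
          intro r hr
          simp only [List.all_eq_true] at hall
          have hj : j < r.length := by simpa using hall r hr
          simp only [Function.comp, List.drop_eq_getElem_cons hj, List.headI]
          rw [List.getD_eq_getElem r "" hj]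
        · rw [← ih (j + 1)]
          congr 1
          simp only [List.map_map]
          apply List.map_congr_left
          intro r _
          simp [Function.comp, List.tail_drop]
      · have hemp : (m.map (List.drop j)).any List.isEmpty := by
          simp only [List.all_eq_true, not_forall] at hall
          obtain ⟨r, hr, hlen⟩ := hall
          simp only [List.any_map, List.any_eq_true, Function.comp]
          refine ⟨r, hr, ?_⟩
          simp only [decide_eq_true_eq] at hlen
          simp only [List.isEmpty_iff, List.drop_eq_nil_iff]
          omega
        simp only [pvInvertDimAux, pvColsB]
        rw [if_pos hemp, if_neg (by rintro ⟨-, h2⟩; exact hall h2)]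

theorem pvInvert_eq_cols (m : List (List String)) :
    pvInvertDim m = pvColsB m m.headI.length 0 := by
  by_cases hm : m = []
  · subst hm
    cases h : ([] : List (List String)).headI.length <;> simp [pvInvertDim, pvColsB]
  · have e : m.map (List.drop 0) = m := by
      rw [List.map_congr_left (fun r _ => List.drop_zero), List.map_id']
    have := pvCols_main m hm m.headI.length 0
    rw [e] at this
    simpa [pvInvertDim, hm] using this

-- ===== VERDICT (by name: the statement is the Claim_ definition above) =====
theorem parser2_spec : Claim_equal_parser2 := by
  intro input _ _
  unfold Spec_parser2 parser2 parser2_alt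
  simp only [pvSeg_top, pvOpsLoop_eq, pvOps_chars, List.nil_append, pvInvert_eq_cols]
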